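-- pv_equiv track=rewrite | github.com/jeongyun-kim/BOJ_Programmers | 프로그래머스/unrated/160586. 대충 만든 자판/대충 만든 자판.py | solution
-- ===== SOURCE A (Python) =====
-- def solution(keymap, targets):
--     answer = []
--     dic = {}
--
--     # 1번키 idx를 갖고있다가 더 작은 값이 나오면 교체
--     for keys in keymap :
--         for idx, c in enumerate(keys) :
--             if c not in dic :
--                 dic[c] = idx+1
--             elif c in dic and dic[c] > idx :
--                  dic[c] = idx+1
--
--     for target in targets :
--         total = 0
--         for c2 in target :
--             if c2 in dic :
--                 total = total + dic[c2]
--             else :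
--                 total = -1
--                 break
--
--         answer.append(total)
--
--     return answer
-- ===== SOURCE B (Python) =====
-- def solution(keymap, targets):
--     answer = []
--     for target in targets:
--         total = 0
--         for c in target:
--             best = None
--             for keys in keymap:
--                 if c in keys:
--                     cost = keys.index(c) + 1
--                     if best is None or cost < best:
--                         best = cost
--             if best is None:
--                 total = -1
--                 break
--             total += best
--         answer.append(total)
--     return answer
-- ===== Notes on version B (the rewrite author's own statement) =====
-- stated objective: alternative
-- what changed: Drops A's precomputed min-position dict entirely: for each target character B scans every keymap string directly, taking the minimum first-occurrence index + 1 across keymaps.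
import Mathlib
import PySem

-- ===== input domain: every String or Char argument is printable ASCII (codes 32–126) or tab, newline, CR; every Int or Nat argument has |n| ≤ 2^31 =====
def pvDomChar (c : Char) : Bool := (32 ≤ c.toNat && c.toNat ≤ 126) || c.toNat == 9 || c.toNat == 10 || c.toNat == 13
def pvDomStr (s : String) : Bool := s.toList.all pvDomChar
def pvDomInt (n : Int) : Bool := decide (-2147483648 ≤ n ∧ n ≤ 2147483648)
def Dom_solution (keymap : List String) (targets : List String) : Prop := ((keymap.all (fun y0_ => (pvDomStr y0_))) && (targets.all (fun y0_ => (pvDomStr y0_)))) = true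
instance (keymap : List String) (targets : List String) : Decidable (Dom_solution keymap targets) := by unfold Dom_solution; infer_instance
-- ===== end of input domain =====

-- B drops A's precomputed min-position dict and instead scans every keymap string per target character (alternative decomposition, not faster).

-- ===== PORT A =====
-- per-target inner loop of A, with `break` as early return of -1
def solutionTotalA (dic : PySem.Dict Char Int) : List Char → Int → Int
  | [], total => total
  | c2 :: cs, total =>
    match dic.get? c2 with
    | some v => solutionTotalA dic cs (total + v)
    | none => -1

def solution (keymap : List String) (targets : List String) : List Int :=
  let dic : PySem.Dict Char Int :=
    keymap.foldl (fun dic keys =>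
      (PySem.List.enumerate keys.toList).foldl (fun dic p =>
        match dic.get? p.2 with
        | none => dic.insert p.2 (p.1 + 1)
        | some v => if v > p.1 then dic.insert p.2 (p.1 + 1) else dic) dic)
      PySem.Dict.empty
  targets.foldl (fun answer target => answer ++ [solutionTotalA dic target.toList 0]) []

-- ===== PORT B =====
-- B's innermost loop: min over keymaps of first-occurrence index + 1 (None if absent everywhere)
def solutionBestB (keymap : List String) (c : Char) : Option Int :=
  keymap.foldl (fun best keys =>
    match PySem.List.index? keys.toList c with
    | none => best
    | some j =>
      let cost : Int := (j : Int) + 1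
      match best with
      | none => some cost
      | some b => if cost < b then some cost else best) none

-- B's per-target loop, with `break` as early return of -1
def solutionTotalB (keymap : List String) : List Char → Int → Int
  | [], total => total
  | c :: cs, total =>
    match solutionBestB keymap c with
    | none => -1
    | some b => solutionTotalB keymap cs (total + b)

def solution_alt (keymap : List String) (targets : List String) : List Int :=
  targets.foldl (fun answer target => answer ++ [solutionTotalB keymap target.toList 0]) []

-- ===== PRECONDITION & SPEC =====
def Spec_solution (keymap : List String) (targets : List String) (out : List Int) : Prop := out = solution_alt keymap targets
instance (keymap : List String) (targets : List String) (out : List Int) : Decidable (Spec_solution keymap targets out) := by unfold Spec_solution; infer_instance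

-- ===== CLAIM (what is proved, stated in full; the proofs are below) =====
def Claim_equal_solution : Prop := ∀ (keymap : List String) (targets : List String), Dom_solution keymap targets → Spec_solution keymap targets (solution keymap targets)

-- ===== LEMMAS AND PROOFS =====

-- optional minimum (Python's running `best`)
def pvOmin : Option Int → Option Int → Option Int
  | none, b => b
  | some a, none => some a
  | some a, some b => some (min a b)

-- first occurrence of c in l, 1-based cost, with offset i
def pvFirst (c : Char) : List Char → Int → Option Int
  | [], _ => none
  | x :: xs, i => if x = c then some (i + 1) else pvFirst c xs (i + 1)

theorem pvOmin_none_right (a : Option Int) : pvOmin a none = a := by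
  cases a <;> rfl

theorem pvFirst_ge (c : Char) (l : List Char) (i v : Int)
    (h : pvFirst c l i = some v) : i + 1 ≤ v := by
  induction l generalizing i with
  | nil => simp [pvFirst] at h
  | cons x xs ih =>
    by_cases hx : x = c
    · simp [pvFirst, hx] at h; omega
    · simp [pvFirst, hx] at h
      have := ih (i + 1) h; omega

-- A's inner (per-keymap) loop updates the dict to the pointwise min
theorem innerA_get (c : Char) (l : List Char) (i : Int) (d : PySem.Dict Char Int) :
    ((PySem.List.enumerate l i).foldl (fun dic p =>
        match dic.get? p.2 with
        | none => dic.insert p.2 (p.1 + 1)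
        | some v => if v > p.1 then dic.insert p.2 (p.1 + 1) else dic) d).get? c
      = pvOmin (d.get? c) (pvFirst c l i) := by
  induction l generalizing i d with
  | nil => simp [PySem.List.enumerate_nil, pvFirst, pvOmin_none_right]
  | cons x xs ih =>
    rw [PySem.List.enumerate_cons]
    simp only [List.foldl_cons]
    by_cases hx : x = c
    · subst hx
      have hstep : (match d.get? x with
          | none => d.insert x (i + 1)
          | some v => if v > i then d.insert x (i + 1) else d).get? x
          = pvOmin (d.get? x) (some (i + 1)) := by
        cases hdx : d.get? x with
        | none => simp [PySem.Dict.get?_insert_self, pvOmin]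
        | some v =>
          by_cases hv : v > i
          · simp [hv, PySem.Dict.get?_insert_self, pvOmin]
            try omega
          · simp [hv, hdx, pvOmin]
            try omega
      have hfx : pvFirst x (x :: xs) i = some (i + 1) := by simp [pvFirst]
      rw [ih, hstep, hfx]
      cases hf : pvFirst x xs (i + 1) with
      | none => rw [pvOmin_none_right]
      | some w =>
        have hw := pvFirst_ge x xs (i + 1) w hf
        cases d.get? x <;> simp only [pvOmin] <;> (congr 1; omega)
    · have hstep : (match d.get? x with
          | none => d.insert x (i + 1)
          | some v => if v > i then d.insert x (i + 1) else d).get? c = d.get? c := by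
        cases hdx : d.get? x with
        | none => exact PySem.Dict.get?_insert_of_ne d (i + 1) (fun h => hx h.symm)
        | some v =>
          by_cases hv : v > i
          · simpa [hv] using PySem.Dict.get?_insert_of_ne d (i + 1) (fun h => hx h.symm)
          · simp [hv]
      rw [ih, hstep, pvFirst, if_neg hx]

-- A's whole dict-building loop, read at key c, is a fold of pvOmin
theorem outerA_get (c : Char) (km : List String) (d : PySem.Dict Char Int) :
    (km.foldl (fun dic keys =>
        (PySem.List.enumerate keys.toList).foldl (fun dic p =>
          match dic.get? p.2 with
          | none => dic.insert p.2 (p.1 + 1)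
          | some v => if v > p.1 then dic.insert p.2 (p.1 + 1) else dic) dic) d).get? c
      = km.foldl (fun acc s => pvOmin acc (pvFirst c s.toList 0)) (d.get? c) := by
  induction km generalizing d with
  | nil => rfl
  | cons s rest ih =>
    simp only [List.foldl_cons]
    rw [ih, innerA_get]

-- pvFirst at offset 0 is index? + 1
theorem pvFirst_eq_index (c : Char) (l : List Char) (i : Int) :
    pvFirst c l i = (PySem.List.index? l c).map (fun (j : Nat) => (j : Int) + i + 1) := by
  induction l generalizing i with
  | nil => simp [pvFirst, PySem.List.index?]
  | cons x xs ih =>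
    by_cases hx : x = c
    · subst hx
      rw [PySem.List.index?_cons_self]
      simp [pvFirst]
    · rw [PySem.List.index?_cons_of_ne xs hx]
      simp only [pvFirst, if_neg hx, ih (i + 1)]
      cases PySem.List.index? xs c
      · simp
      · simp
        ring

-- B's scan of the keymaps is the same pvOmin fold
theorem bestB_eq (c : Char) (km : List String) :
    solutionBestB km c = km.foldl (fun acc s => pvOmin acc (pvFirst c s.toList 0)) none := by
  unfold solutionBestB
  apply PySem.List.foldl_congr_mem
  intro acc s _
  rw [pvFirst_eq_index]
  cases hj : PySem.List.index? s.toList c with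
  | none => simp [pvOmin_none_right]
  | some j =>
    cases acc with
    | none => simp [pvOmin]
    | some b =>
      simp only [Option.map_some, pvOmin]
      split_ifs with h <;> (congr 1; omega)

-- main pointwise lookup equality
theorem dic_eq_bestB (c : Char) (km : List String) :
    (km.foldl (fun dic keys =>
        (PySem.List.enumerate keys.toList).foldl (fun dic p =>
          match dic.get? p.2 with
          | none => dic.insert p.2 (p.1 + 1)
          | some v => if v > p.1 then dic.insert p.2 (p.1 + 1) else dic) dic)
      PySem.Dict.empty).get? c = solutionBestB km c := by
  rw [outerA_get, bestB_eq, PySem.Dict.get?_empty]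

theorem totals_eq (km : List String) (cs : List Char) (t : Int) :
    solutionTotalA (km.foldl (fun dic keys =>
        (PySem.List.enumerate keys.toList).foldl (fun dic p =>
          match dic.get? p.2 with
          | none => dic.insert p.2 (p.1 + 1)
          | some v => if v > p.1 then dic.insert p.2 (p.1 + 1) else dic) dic)
      PySem.Dict.empty) cs t = solutionTotalB km cs t := by
  induction cs generalizing t with
  | nil => rfl
  | cons c rest ih =>
    simp only [solutionTotalA, solutionTotalB, dic_eq_bestB]
    cases solutionBestB km c with
    | none => rfl
    | some v => exact ih (t + v)

-- ===== VERDICT (by name: the statement is the Claim_ definition above) =====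
theorem solution_spec : Claim_equal_solution := by
  intro keymap targets _
  unfold Spec_solution solution solution_alt
  apply PySem.List.foldl_congr_mem
  intro acc target _
  rw [totals_eq]
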